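-- pv_equiv track=rewrite | github.com/silenciador9/PAR-Final-Project | DES.py | get_master_key_1
-- ===== SOURCE A (Python) =====
-- P10_prime = [7,3,1,5,2,10,4,9,8,6] # inverse P10
--
-- P8_prime = [2,4,6,1,3,5,8,7] # inverse P8
--
-- def right_shift(x):
--     lsd = x[len(x)-1]
--     new = lsd
--     for i in x[:len(x)-1]:
--         new = new + i
--     return new
--
-- def permute( dat, perm ) :
--     new_dat = ''
--     for i in perm:
--         new_dat += dat[i-1]
--     return new_dat
--
-- def get_master_key_1 ( SUB_KEY_1 ) :
--     pos_keys = []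
--
--     for i in ['0','1']: # first two digits are unknown
--         for j in ['0','1']: # first two digits unknown
--             pos_keys.append(i+j+permute(SUB_KEY_1, P8_prime))
--
--
--     for i in range(0,len(pos_keys)):
--         key = pos_keys[i]
--         L = right_shift(key[:5])
--         R = right_shift(key[5:])
--         key = L + R
--         pos_keys[i] = permute(key, P10_prime)
--
--     return pos_keys
-- ===== SOURCE B (Python) =====
-- # B: the four right-rotations + P10_prime step is fused, at module load, into one
-- # composite permutation over the 10-char candidate; each key is then built in a single pass.
-- P10_prime = [7,3,1,5,2,10,4,9,8,6]  # inverse P10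
-- P8_prime = [2,4,6,1,3,5,8,7]        # inverse P8
--
-- # right_shift on each 5-char half moves the last char of the half to its front:
-- _ROT = [4,0,1,2,3, 9,5,6,7,8]
-- # composite: output position k reads candidate position _ROT[P10_prime[k]-1]
-- _COMP = [_ROT[p-1] for p in P10_prime]
--
-- def get_master_key_1(SUB_KEY_1):
--     core = ''.join(SUB_KEY_1[p-1] for p in P8_prime)
--     return [''.join((i+j+core)[k] for k in _COMP) for i in '01' for j in '01']
-- ===== Notes on version B (the rewrite author's own statement) =====
-- stated objective: simpler
-- what changed: B precomputes, once, the composite of the two per-half right-rotations and the inverse-P10 table into a single length-10 permutation, so each candidate key is produced by one indexing pass instead of slicing into halves, rotating each half, reassembling and permuting.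
import Mathlib
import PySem

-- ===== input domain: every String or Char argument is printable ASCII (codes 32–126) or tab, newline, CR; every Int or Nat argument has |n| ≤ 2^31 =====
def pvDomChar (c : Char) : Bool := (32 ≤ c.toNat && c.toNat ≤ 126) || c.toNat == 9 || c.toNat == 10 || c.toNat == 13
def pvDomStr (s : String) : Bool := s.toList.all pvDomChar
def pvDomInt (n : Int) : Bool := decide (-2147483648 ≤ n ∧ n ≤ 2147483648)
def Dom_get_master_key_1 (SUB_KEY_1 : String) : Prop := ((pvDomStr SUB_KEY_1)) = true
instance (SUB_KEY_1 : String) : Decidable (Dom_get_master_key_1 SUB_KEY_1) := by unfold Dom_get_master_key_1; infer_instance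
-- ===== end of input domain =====

-- B fuses the two per-half right-rotations and the inverse-P10 step into one precomputed
-- composite permutation, building each candidate key in a single pass (objective: simpler).

-- ===== PORT A =====
-- strings are handled on the code-point (List Char) side, wrapped back with String.ofList
def pvP10_prime : List Int := [7,3,1,5,2,10,4,9,8,6]
def pvP8_prime : List Int := [2,4,6,1,3,5,8,7]

-- permute: dat[i-1] out of range is IndexError (none); excluded by Pre_, Option.toList drops it
def pvPermuteA (dat : List Char) (perm : List Int) : List Char :=
  perm.foldl (fun new_dat i => new_dat ++ (PySem.List.pyGet? dat (i - 1)).toList) []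

-- right_shift: x[len(x)-1] on empty x is IndexError (never reached under Pre_)
def pvRightShiftA (x : List Char) : List Char :=
  let lsd := (PySem.List.pyGet? x ((x.length : Int) - 1)).toList
  (PySem.List.slice x none (some ((x.length : Int) - 1))).foldl (fun new i => new ++ [i]) lsd

def get_master_key_1 (SUB_KEY_1 : String) : List String :=
  let dat := SUB_KEY_1.toList
  let pos_keys : List (List Char) :=
    [['0'], ['1']].foldl (fun acc i =>
      [['0'], ['1']].foldl (fun acc2 j =>
        acc2 ++ [i ++ j ++ pvPermuteA dat pvP8_prime]) acc) []
  let final :=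
    (PySem.List.pyRange 0 (pos_keys.length : Int) 1).foldl (fun pk i =>
      match PySem.List.pyGet? pk i with
      | some key =>
        let L := pvRightShiftA (PySem.List.slice key none (some 5))
        let R := pvRightShiftA (PySem.List.slice key (some 5) none)
        pk.set i.toNat (pvPermuteA (L ++ R) pvP10_prime)
      | none => pk) pos_keys
  final.map String.ofList

-- ===== PORT B =====
-- right_shift on each 5-char half moves the half's last char to its front:
def pvRotB : List Int := [4,0,1,2,3,9,5,6,7,8]
-- composite: output position k reads candidate position pvRotB[P10_prime[k]-1]
def pvCompB : List Int := pvP10_prime.map (fun p => ((PySem.List.pyGet? pvRotB (p - 1)).getD 0))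

def get_master_key_1_alt (SUB_KEY_1 : String) : List String :=
  let dat := SUB_KEY_1.toList
  let core := pvP8_prime.flatMap (fun p => (PySem.List.pyGet? dat (p - 1)).toList)
  ['0', '1'].flatMap (fun i => ['0', '1'].map (fun j =>
    let cand := i :: j :: core
    String.ofList (pvCompB.flatMap (fun k => (PySem.List.pyGet? cand k).toList))))

-- ===== PRECONDITION & SPEC =====
-- A (and B) index SUB_KEY_1 at positions 1..8: shorter inputs raise IndexError in both.
def Pre_get_master_key_1 (SUB_KEY_1 : String) : Prop := 8 ≤ SUB_KEY_1.toList.length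
instance (SUB_KEY_1 : String) : Decidable (Pre_get_master_key_1 SUB_KEY_1) := by
  unfold Pre_get_master_key_1; infer_instance
def pvWitness_get_master_key_1 : String := "abcdefgh"

def Spec_get_master_key_1 (SUB_KEY_1 : String) (out : List String) : Prop := out = get_master_key_1_alt SUB_KEY_1
instance (SUB_KEY_1 : String) (out : List String) : Decidable (Spec_get_master_key_1 SUB_KEY_1 out) := by unfold Spec_get_master_key_1; infer_instance

-- ===== CLAIM (what is proved, stated in full; the proofs are below) =====
def Claim_equal_get_master_key_1 : Prop := ∀ (SUB_KEY_1 : String), Dom_get_master_key_1 SUB_KEY_1 → Pre_get_master_key_1 SUB_KEY_1 → Spec_get_master_key_1 SUB_KEY_1 (get_master_key_1 SUB_KEY_1)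

-- ===== LEMMAS AND PROOFS =====

-- pyGet? at indices 0..7 of a list with 8 known leading elements
theorem pvGet8 {α : Type} (a b c d e f g k : α) (t : List α) :
    PySem.List.pyGet? (a::b::c::d::e::f::g::k::t) 0 = some a ∧
    PySem.List.pyGet? (a::b::c::d::e::f::g::k::t) 1 = some b ∧
    PySem.List.pyGet? (a::b::c::d::e::f::g::k::t) 2 = some c ∧
    PySem.List.pyGet? (a::b::c::d::e::f::g::k::t) 3 = some d ∧
    PySem.List.pyGet? (a::b::c::d::e::f::g::k::t) 4 = some e ∧
    PySem.List.pyGet? (a::b::c::d::e::f::g::k::t) 5 = some f ∧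
    PySem.List.pyGet? (a::b::c::d::e::f::g::k::t) 6 = some g ∧
    PySem.List.pyGet? (a::b::c::d::e::f::g::k::t) 7 = some k := by
  exact ⟨by simp, by simpa using PySem.List.pyGet?_natCast (a::b::c::d::e::f::g::k::t) 1, by simpa using PySem.List.pyGet?_natCast (a::b::c::d::e::f::g::k::t) 2, by simpa using PySem.List.pyGet?_natCast (a::b::c::d::e::f::g::k::t) 3, by simpa using PySem.List.pyGet?_natCast (a::b::c::d::e::f::g::k::t) 4, by simpa using PySem.List.pyGet?_natCast (a::b::c::d::e::f::g::k::t) 5, by simpa using PySem.List.pyGet?_natCast (a::b::c::d::e::f::g::k::t) 6, by simpa using PySem.List.pyGet?_natCast (a::b::c::d::e::f::g::k::t) 7⟩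

theorem pvPermA8 (a b c d e f g k : Char) (t : List Char) :
    pvPermuteA (a::b::c::d::e::f::g::k::t) pvP8_prime = [b,d,f,a,c,e,k,g] := by
  obtain ⟨h0, h1, h2, h3, h4, h5, h6, h7⟩ := pvGet8 a b c d e f g k t
  simp [pvPermuteA, pvP8_prime, h1, h2, h3, h4, h5, h6, h7]

theorem pvRshift5 (v w x y z : Char) : pvRightShiftA [v,w,x,y,z] = [z,v,w,x,y] := by
  simp [pvRightShiftA, PySem.List.slice_to]

theorem pvPermA10 (c0 c1 c2 c3 c4 c5 c6 c7 c8 c9 : Char) :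
    pvPermuteA [c0,c1,c2,c3,c4,c5,c6,c7,c8,c9] pvP10_prime = [c6,c2,c0,c4,c1,c9,c3,c8,c7,c5] := by
  simp [pvPermuteA, pvP10_prime]

theorem pvCoreB (a b c d e f g k : Char) (t : List Char) :
    (pvP8_prime.flatMap (fun p => (PySem.List.pyGet? (a::b::c::d::e::f::g::k::t) (p - 1)).toList))
      = [b,d,f,a,c,e,k,g] := by
  obtain ⟨h0, h1, h2, h3, h4, h5, h6, h7⟩ := pvGet8 a b c d e f g k t
  simp [pvP8_prime, h1, h2, h3, h4, h5, h6, h7]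

set_option maxHeartbeats 1000000 in
theorem get_master_key_1_eq_alt (S : String) (h : 8 ≤ S.toList.length) :
    get_master_key_1 S = get_master_key_1_alt S := by
  rcases hl : S.toList with _ | ⟨a, _ | ⟨b, _ | ⟨c, _ | ⟨d, _ | ⟨e, _ | ⟨f, _ | ⟨g, _ | ⟨k, t⟩⟩⟩⟩⟩⟩⟩⟩ <;>
    rw [hl] at h <;> simp at h
  rw [get_master_key_1, get_master_key_1_alt, hl]
  simp only [pvPermA8, pvCoreB, List.foldl]
  simp only [List.nil_append, List.cons_append]
  norm_num
  rw [show PySem.List.pyRange 0 (4:Int) 1 = [0,1,2,3] from by decide]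
  rw [show pvCompB = [5,1,4,3,0,8,2,7,6,9] from by decide]
  simp [PySem.List.slice_to, PySem.List.slice_from, pvRshift5, pvPermA10]

-- ===== VERDICT (by name: the statement is the Claim_ definition above) =====
theorem get_master_key_1_spec : Claim_equal_get_master_key_1 := by
  intro S _ hpre
  unfold Spec_get_master_key_1
  exact get_master_key_1_eq_alt S hpre
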